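-- pv_equiv track=rewrite | github.com/chymk/Data-Structure | Stacks/Finding_Spans_Using_Stacks.py | findingSpans2
-- ===== SOURCE A (Python) =====
-- class Stack:
--     def __init__(self):
--         self.items=[]
--
--     def isEmpty(self):
--         if self.items == []:
--             return True
--         else:
--             return False
--
--     def peek(self):
--         return self.items[-1]
--
--     def pop(self):
--         return self.items.pop()
--
--     def push(self,k):
--         self.items.append(k)
--
-- def findingSpans2(A):
--     s = [None]*len(A)
--     d =Stack()
--     for i in range(0,len(A)):
--         while not d.isEmpty() and A[i]>=A[d.peek()]:
--             d.pop()
--         if d.isEmpty():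
--             p = -1
--         else:
--             p = d.peek()
--         s[i] = i-p
--         d.push(i)
--     return s
-- ===== SOURCE B (Python) =====
-- def findingSpans2(A):
--     s = []
--     for i in range(len(A)):
--         j = i - 1
--         while j >= 0 and A[j] <= A[i]:
--             j -= 1
--         s.append(i - j)
--     return s
-- ===== Notes on version B (the rewrite author's own statement) =====
-- stated objective: simpler
-- what changed: Replaces the index stack with a direct backward scan from i-1 to the nearest strictly greater element, dropping the Stack class entirely.
import Mathlib
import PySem

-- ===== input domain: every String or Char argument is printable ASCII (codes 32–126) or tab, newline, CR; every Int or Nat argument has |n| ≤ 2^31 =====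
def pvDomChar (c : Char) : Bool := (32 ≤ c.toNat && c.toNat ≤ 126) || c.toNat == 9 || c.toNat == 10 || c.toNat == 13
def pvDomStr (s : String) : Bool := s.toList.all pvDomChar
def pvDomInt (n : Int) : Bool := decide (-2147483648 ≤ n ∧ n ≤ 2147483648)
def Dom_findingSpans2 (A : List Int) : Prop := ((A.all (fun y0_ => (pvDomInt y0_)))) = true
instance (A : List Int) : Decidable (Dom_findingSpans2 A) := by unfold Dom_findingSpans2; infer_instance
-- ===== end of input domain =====

-- B replaces A's index stack with a direct backward scan to the nearest strictly
-- greater previous element (simpler: no Stack class, one plain nested loop).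


-- ===== PORT A =====
-- The stack 'd' is a List Nat with the TOP AT THE HEAD (Python appends/pops at the
-- end); the while-loop of pops is the structural recursion popWhileA.  All indices
-- pushed/peeked are in range, so A[...] is A.getD ... 0 exactly.
def popWhileA (A : List Int) (v : Int) : List Nat → List Nat
  | [] => []
  | j :: rest => if A.getD j 0 ≤ v then popWhileA A v rest else j :: rest

def topA : List Nat → Int
  | [] => -1
  | j :: _ => (j : Int)

-- one iteration of A's for-loop: pop, read p, set s[i] (filled in index order,
-- hence an append), push i
def stepA (A : List Int) (st : List Int × List Nat) (i : Nat) : List Int × List Nat :=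
  let d := popWhileA A (A.getD i 0) st.2
  (st.1 ++ [(i : Int) - topA d], i :: d)

def findingSpans2 (A : List Int) : List Int :=
  ((List.range A.length).foldl (stepA A) ([], [])).1

-- ===== PORT B =====
-- Source B's inner while loop: walk j from i-1 downward while A[j] ≤ v; result is the
-- final j (the nearest strictly greater index, or -1).
def prevIdx (A : List Int) (v : Int) : Nat → Int
  | 0 => -1
  | j + 1 => if A.getD j 0 ≤ v then prevIdx A v j else (j : Int)

def findingSpans2_alt (A : List Int) : List Int :=
  (List.range A.length).map (fun i : Nat => ((i : Int)) - prevIdx A (A.getD i 0) i)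

-- ===== PRECONDITION & SPEC =====
def Spec_findingSpans2 (A : List Int) (out : List Int) : Prop := out = findingSpans2_alt A
instance (A : List Int) (out : List Int) : Decidable (Spec_findingSpans2 A out) := by unfold Spec_findingSpans2; infer_instance

-- ===== CLAIM (what is proved, stated in full; the proofs are below) =====
def Claim_equal_findingSpans2 : Prop := ∀ (A : List Int), Dom_findingSpans2 A → Spec_findingSpans2 A (findingSpans2 A)

-- ===== LEMMAS AND PROOFS =====

-- the stack invariant: popping with any threshold v reads off exactly B's backward scan
def SpanInv (A : List Int) (i : Nat) (d : List Nat) : Prop :=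
  ∀ v : Int, topA (popWhileA A v d) = prevIdx A v i

theorem popWhileA_popWhileA (A : List Int) (u v : Int) (h : u ≤ v) :
    ∀ d : List Nat, popWhileA A v (popWhileA A u d) = popWhileA A v d := by
  intro d
  induction d with
  | nil => rfl
  | cons j rest ih =>
      by_cases hj : A[j]?.getD 0 ≤ u
      · simp [popWhileA, hj, le_trans hj h, ih]
      · simp [popWhileA, hj]

theorem SpanInv_step (A : List Int) (i : Nat) (d : List Nat) (hInv : SpanInv A i d) :
    SpanInv A (i + 1) (i :: popWhileA A (A.getD i 0) d) := by
  intro v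
  by_cases h : A[i]?.getD 0 ≤ v
  · simp [popWhileA, prevIdx, h, popWhileA_popWhileA A _ v h, hInv v]
  · simp [popWhileA, prevIdx, h, topA]

theorem foldl_spans (A : List Int) : ∀ n : Nat,
    ((List.range n).foldl (stepA A) ([], [])).1
      = (List.range n).map (fun i : Nat => ((i : Int)) - prevIdx A (A.getD i 0) i)
    ∧ SpanInv A n ((List.range n).foldl (stepA A) ([], [])).2 := by
  intro n
  induction n with
  | zero => exact ⟨rfl, fun v => rfl⟩
  | succ n ih =>
      obtain ⟨h1, h2⟩ := ih
      constructor
      · simp [List.range_succ, List.foldl_append, stepA, h1]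
        exact h2 _
      · simp only [List.range_succ, List.foldl_append, List.foldl_cons, List.foldl_nil]
        exact SpanInv_step A n _ h2

-- ===== VERDICT (by name: the statement is the Claim_ definition above) =====
theorem findingSpans2_spec : Claim_equal_findingSpans2 := by
  intro A _
  unfold Spec_findingSpans2 findingSpans2 findingSpans2_alt
  exact (foldl_spans A A.length).1
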